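-- pv_equiv track=rewrite | github.com/edayot/advent-of-code | day1/main.py | resolve2
-- ===== SOURCE A (Python) =====
-- def resolve2(L1: list[int], L2: list[int]):
--     sum = 0
--     for a in L1:
--         occur = 0
--         for b in L2:
--             if a == b:
--                 occur += 1
--         sum += occur * a
--     return sum
-- ===== SOURCE B (Python) =====
-- def resolve2(L1: list[int], L2: list[int]):
--     A = sorted(L1)
--     B = sorted(L2)
--     i = j = 0
--     total = 0
--     while i < len(A) and j < len(B):
--         if A[i] < B[j]:
--             i += 1
--         elif B[j] < A[i]:
--             j += 1
--         else:
--             v = A[i]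
--             c1 = 0
--             while i < len(A) and A[i] == v:
--                 c1 += 1
--                 i += 1
--             c2 = 0
--             while j < len(B) and B[j] == v:
--                 c2 += 1
--                 j += 1
--             total += v * c1 * c2
--     return total
-- ===== Notes on version B (the rewrite author's own statement) =====
-- stated objective: faster
-- what changed: Replaced the nested membership scan with a sort of copies of both lists followed by a two-pointer merge that groups equal runs and adds value * run-length(L1) * run-length(L2).
import Mathlib
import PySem

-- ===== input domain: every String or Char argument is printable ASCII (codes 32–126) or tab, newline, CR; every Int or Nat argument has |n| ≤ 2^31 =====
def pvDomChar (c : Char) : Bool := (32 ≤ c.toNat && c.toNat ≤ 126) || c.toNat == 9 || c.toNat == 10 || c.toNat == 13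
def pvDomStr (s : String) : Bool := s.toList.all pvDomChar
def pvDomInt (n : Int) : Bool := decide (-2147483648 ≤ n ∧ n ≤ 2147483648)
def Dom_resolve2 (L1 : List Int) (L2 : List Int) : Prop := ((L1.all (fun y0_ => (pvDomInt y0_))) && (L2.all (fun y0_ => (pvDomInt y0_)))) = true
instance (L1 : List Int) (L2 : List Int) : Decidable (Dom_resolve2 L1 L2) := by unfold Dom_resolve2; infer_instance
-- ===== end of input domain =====

-- B replaces A's nested membership scan by sorting copies of both lists and a two-pointer
-- merge over the sorted data, grouping equal runs (objective: faster, O((n+m)log) vs O(n*m)).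

-- ===== PORT A =====
-- for a in L1: inner scan counts occurrences of a in L2; sum += occur * a
def resolve2 (L1 : List Int) (L2 : List Int) : Int :=
  L1.foldl (fun sum a =>
    sum + (L2.foldl (fun occur b => if a == b then occur + 1 else occur) 0) * a) 0

-- ===== PORT B =====
-- the while loop over the two sorted arrays, as structural recursion on the two suffixes;
-- the two inner run-counting loops are the takeWhile lengths / dropWhile tails
def mergeRuns : List Int → List Int → Int
  | [], _ => 0
  | _ :: _, [] => 0
  | x :: xs, y :: ys =>
    if x < y then mergeRuns xs (y :: ys)
    else if y < x then mergeRuns (x :: xs) ys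
    else
      x * (1 + ((xs.takeWhile (· == x)).length : Int)) * (1 + ((ys.takeWhile (· == x)).length : Int))
        + mergeRuns (xs.dropWhile (· == x)) (ys.dropWhile (· == x))
termination_by a b => a.length + b.length
decreasing_by
  · simp
  · simp
  · have h1 := List.length_dropWhile_le (p := (· == x)) (l := xs)
    have h2 := List.length_dropWhile_le (p := (· == x)) (l := ys)
    simp; omega

def resolve2_alt (L1 : List Int) (L2 : List Int) : Int :=
  mergeRuns (PySem.List.sorted L1 (fun v => v) false) (PySem.List.sorted L2 (fun v => v) false)

-- ===== PRECONDITION & SPEC =====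
def Spec_resolve2 (L1 : List Int) (L2 : List Int) (out : Int) : Prop := out = resolve2_alt L1 L2
instance (L1 : List Int) (L2 : List Int) (out : Int) : Decidable (Spec_resolve2 L1 L2 out) := by unfold Spec_resolve2; infer_instance

-- ===== CLAIM (what is proved, stated in full; the proofs are below) =====
def Claim_equal_resolve2 : Prop := ∀ (L1 : List Int) (L2 : List Int), Dom_resolve2 L1 L2 → Spec_resolve2 L1 L2 (resolve2 L1 L2)

-- ===== LEMMAS AND PROOFS =====

-- the common value both programs compute: Σ_{a ∈ xs} a * (count of a in ys)
def wSum (xs ys : List Int) : Int :=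
  (xs.map (fun a => a * (ys.count a : Int))).sum

lemma wSum_nil_right (xs : List Int) : wSum xs [] = 0 := by
  simp [wSum]

lemma wSum_cons (a : Int) (xs ys : List Int) :
    wSum (a :: xs) ys = a * (ys.count a : Int) + wSum xs ys := by
  simp [wSum]

lemma wSum_append (xs₁ xs₂ ys : List Int) :
    wSum (xs₁ ++ xs₂) ys = wSum xs₁ ys + wSum xs₂ ys := by
  simp [wSum]

-- A's inner scan counts occurrences of a in L2
lemma innerA_count (L2 : List Int) (a : Int) (s : Int) :
    L2.foldl (fun occur b => if a == b then occur + 1 else occur) s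
      = s + (L2.count a : Int) := by
  induction L2 generalizing s with
  | nil => simp
  | cons x xs ih =>
      simp only [List.foldl_cons, List.count_cons, ih]
      by_cases h : a = x
      · simp [h]; ring
      · have h' : ¬ (x = a) := fun hx => h hx.symm
        simp [beq_iff_eq, h, h']

lemma resolve2_eq_wSum (L1 L2 : List Int) : resolve2 L1 L2 = wSum L1 L2 := by
  unfold resolve2
  have : ∀ s, L1.foldl (fun sum a =>
      sum + (L2.foldl (fun occur b => if a == b then occur + 1 else occur) 0) * a) s
      = s + wSum L1 L2 := by
    intro s
    induction L1 generalizing s with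
    | nil => simp [wSum]
    | cons a xs ih =>
        rw [List.foldl_cons, ih, innerA_count, wSum_cons]
        ring
  simpa using this 0

-- right list: dropping a head ≠ every element of xs leaves wSum unchanged
lemma wSum_cons_right (xs ys : List Int) (y : Int) (h : ∀ a ∈ xs, a ≠ y) :
    wSum xs (y :: ys) = wSum xs ys := by
  induction xs with
  | nil => simp [wSum]
  | cons a l ih =>
      rw [wSum_cons, wSum_cons, ih (fun a ha => h a (by simp [ha]))]
      rw [List.count_cons]
      have hne : y ≠ a := Ne.symm (h a (by simp))
      simp [hne]

lemma wSum_drop_right (xs pre ys : List Int) (h : ∀ a ∈ xs, ∀ b ∈ pre, a ≠ b) :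
    wSum xs (pre ++ ys) = wSum xs ys := by
  induction pre with
  | nil => simp
  | cons y p ih =>
      rw [List.cons_append, wSum_cons_right _ _ _ (fun a ha => h a ha y (by simp))]
      exact ih (fun a ha b hb => h a ha b (by simp [hb]))

-- in a sorted list whose elements are all ≥ x, the elements of dropWhile (== x) are > x
lemma dropWhile_gt (x : Int) (l : List Int) (hs : l.Pairwise (· ≤ ·))
    (hge : ∀ a ∈ l, x ≤ a) : ∀ a ∈ l.dropWhile (· == x), x < a := by
  induction l with
  | nil => simp
  | cons b t ih =>
      rw [List.pairwise_cons] at hs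
      by_cases hb : b = x
      · rw [List.dropWhile_cons_of_pos (by simp [hb])]
        exact ih hs.2 (fun a ha => hge a (by simp [ha]))
      · rw [List.dropWhile_cons_of_neg (by simp [hb])]
        intro a ha
        have hxb : x < b := lt_of_le_of_ne (hge b (by simp)) (Ne.symm hb)
        rcases List.mem_cons.mp ha with h | h
        · omega
        · exact lt_of_lt_of_le hxb (hs.1 a h)

lemma takeWhile_all_eq (x : Int) (l : List Int) :
    ∀ a ∈ l.takeWhile (· == x), a = x := by
  intro a ha
  simpa using List.mem_takeWhile_imp ha

-- count of x in a sorted list whose elements are all ≥ x is the length of the leading run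
lemma count_eq_run (x : Int) (l : List Int) (hs : l.Pairwise (· ≤ ·))
    (hge : ∀ a ∈ l, x ≤ a) :
    l.count x = (l.takeWhile (· == x)).length := by
  conv_lhs => rw [← List.takeWhile_append_dropWhile (p := (· == x)) (l := l)]
  rw [List.count_append]
  have h1 : (l.takeWhile (· == x)).count x = (l.takeWhile (· == x)).length :=
    List.count_eq_length.mpr (fun b hb => ((takeWhile_all_eq x l) b hb).symm)
  have h2 : (l.dropWhile (· == x)).count x = 0 :=
    List.count_eq_zero.mpr (fun hmem => absurd (dropWhile_gt x l hs hge x hmem) (lt_irrefl x))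
  omega

-- the merge over two sorted lists computes wSum
lemma mergeRuns_eq_wSum (xs ys : List Int)
    (hx : xs.Pairwise (· ≤ ·)) (hy : ys.Pairwise (· ≤ ·)) :
    mergeRuns xs ys = wSum xs ys := by
  induction xs, ys using mergeRuns.induct with
  | case1 ys => simp [mergeRuns, wSum]
  | case2 x xs => simp [mergeRuns, wSum_nil_right]
  | case3 x xs y ys hlt ih =>
      rw [List.pairwise_cons] at hx hy
      rw [mergeRuns, if_pos hlt, ih hx.2 (List.pairwise_cons.mpr hy), wSum_cons]
      have hcz : (y :: ys).count x = 0 := by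
        apply List.count_eq_zero.mpr
        intro hmem
        rcases List.mem_cons.mp hmem with h | h
        · omega
        · have := hy.1 x h; omega
      simp [hcz]
  | case4 x xs y ys hnlt hlt ih =>
      rw [List.pairwise_cons] at hy
      rw [mergeRuns, if_neg hnlt, if_pos hlt, ih (by exact hx) hy.2]
      rw [wSum_cons_right]
      intro a ha
      rcases List.mem_cons.mp ha with h | h
      · omega
      · rw [List.pairwise_cons] at hx
        have := hx.1 a h; omega
  | case5 x xs y ys hnlt hnlt' ih =>
      have hxy : x = y := by omega
      subst hxy
      rw [List.pairwise_cons] at hx hy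
      rw [mergeRuns, if_neg hnlt, if_neg hnlt']
      have hxs' : (xs.dropWhile (· == x)).Pairwise (· ≤ ·) :=
        hx.2.sublist (List.dropWhile_sublist _)
      have hys' : (ys.dropWhile (· == x)).Pairwise (· ≤ ·) :=
        hy.2.sublist (List.dropWhile_sublist _)
      rw [ih hxs' hys']
      -- count of x in (x :: ys) = 1 + run length in ys
      have hc2 : ((x :: ys).count x : Int)
          = 1 + ((ys.takeWhile (· == x)).length : Int) := by
        rw [List.count_cons_self, count_eq_run x ys hy.2 hy.1]
        push_cast; ring
      -- decompose the left list
      have hsplit : x :: xs = (x :: xs.takeWhile (· == x)) ++ xs.dropWhile (· == x) := by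
        simp [List.takeWhile_append_dropWhile]
      rw [hsplit, wSum_append]
      -- head block: every element equals x
      have hblock : wSum (x :: xs.takeWhile (· == x)) (x :: ys)
          = x * (1 + ((xs.takeWhile (· == x)).length : Int))
              * (1 + ((ys.takeWhile (· == x)).length : Int)) := by
        rw [wSum_cons, ← hc2]
        have htail : wSum (xs.takeWhile (· == x)) (x :: ys)
            = ((xs.takeWhile (· == x)).length : Int) * (x * ((x :: ys).count x : Int)) := by
          generalize hl : xs.takeWhile (· == x) = l
          have hall : ∀ a ∈ l, a = x := hl ▸ takeWhile_all_eq x xs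
          clear hl
          induction l with
          | nil => simp [wSum]
          | cons a t iht =>
              rw [wSum_cons, hall a (by simp),
                iht (fun b hb => hall b (by simp [hb]))]
              simp only [List.length_cons]
              push_cast; ring
        rw [htail]; ring
      rw [hblock]
      -- tail block: elements > x, so removing the x-run on the right changes nothing
      have hgt : ∀ a ∈ xs.dropWhile (· == x), x < a :=
        dropWhile_gt x xs hx.2 hx.1
      have hdrop : wSum (xs.dropWhile (· == x)) (x :: ys)
          = wSum (xs.dropWhile (· == x)) (ys.dropWhile (· == x)) := by
        have hys_split : x :: ys = (x :: ys.takeWhile (· == x)) ++ ys.dropWhile (· == x) := by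
          simp [List.takeWhile_append_dropWhile]
        rw [hys_split, wSum_drop_right]
        intro a ha b hb
        rcases List.mem_cons.mp hb with h | h
        · have := hgt a ha; omega
        · have hbx := takeWhile_all_eq x ys b h
          have := hgt a ha; omega
      rw [hdrop]

-- wSum is invariant under permuting either list
lemma wSum_perm (L1 L2 M1 M2 : List Int) (h1 : M1.Perm L1) (h2 : M2.Perm L2) :
    wSum M1 M2 = wSum L1 L2 := by
  unfold wSum
  have hmap : ∀ (l : List Int), (l.map (fun a => a * (M2.count a : Int)))
      = l.map (fun a => a * (L2.count a : Int)) := by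
    intro l
    apply List.map_congr_left
    intro a _
    rw [h2.count_eq]
  calc (M1.map (fun a => a * (M2.count a : Int))).sum
      = (M1.map (fun a => a * (L2.count a : Int))).sum := by rw [hmap]
    _ = (L1.map (fun a => a * (L2.count a : Int))).sum :=
        (h1.map _).sum_eq

-- ===== VERDICT (by name: the statement is the Claim_ definition above) =====
theorem resolve2_spec : Claim_equal_resolve2 := by
  intro L1 L2 _
  unfold Spec_resolve2 resolve2_alt
  rw [resolve2_eq_wSum,
    mergeRuns_eq_wSum _ _ (PySem.List.sorted_pairwise L1 (fun v => v))
      (PySem.List.sorted_pairwise L2 (fun v => v))]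
  exact (wSum_perm L1 L2 _ _ (PySem.List.sorted_perm L1 _ _)
    (PySem.List.sorted_perm L2 _ _)).symm
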